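-- pv_equiv track=rewrite | github.com/samuelbraun04/SEG4300_Project | AutomatedYoutube.py | process_topics_and_paragraphs
-- ===== SOURCE A (Python) =====
-- def process_topics_and_paragraphs(list_of_things, max_length_for_topic):
--     new_final_script = []
--     current_paragraph = ""
--
--     for index, item in enumerate(list_of_things):
--         if len(item) < max_length_for_topic:
--             # If there's a paragraph being built, append it before adding a new topic
--             if current_paragraph:
--                 new_final_script.append(current_paragraph)
--                 current_paragraph = ""  # Reset current paragraph
--             new_final_script.append(item)  # Append topic directly
--         else:
--             # For paragraphs, merge with the current_paragraph string
--             if current_paragraph: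
--                 current_paragraph += " " + item  # Merge with existing paragraph
--             else:
--                 current_paragraph = item  # Start a new paragraph
--     if current_paragraph:
--         new_final_script.append(current_paragraph)
--
--     return new_final_script
-- ===== SOURCE B (Python) =====
-- def process_topics_and_paragraphs(list_of_things, max_length_for_topic):
--     result = []
--     i = 0
--     n = len(list_of_things)
--     while i < n:
--         if len(list_of_things[i]) >= max_length_for_topic:
--             # scan the maximal consecutive run of long items and join it
--             j = i
--             while j < n and len(list_of_things[j]) >= max_length_for_topic:
--                 j += 1
--             result.append(' '.join(list_of_things[i:j]))
--             i = j
--         else: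
--             result.append(list_of_things[i])
--             i += 1
--     return result
-- ===== Notes on version B (the rewrite author's own statement) =====
-- stated objective: alternative
-- what changed: Replaced A's single pass carrying a growing current_paragraph string with a run-scanning decomposition: an inner scan finds each maximal consecutive run of long items and appends ' '.join of the run at once, short items are appended individually.
-- outside the precondition, e.g. on process_topics_and_paragraphs(['', 'a'], 0): A returns ['a'], B returns [' a']
import Mathlib
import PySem

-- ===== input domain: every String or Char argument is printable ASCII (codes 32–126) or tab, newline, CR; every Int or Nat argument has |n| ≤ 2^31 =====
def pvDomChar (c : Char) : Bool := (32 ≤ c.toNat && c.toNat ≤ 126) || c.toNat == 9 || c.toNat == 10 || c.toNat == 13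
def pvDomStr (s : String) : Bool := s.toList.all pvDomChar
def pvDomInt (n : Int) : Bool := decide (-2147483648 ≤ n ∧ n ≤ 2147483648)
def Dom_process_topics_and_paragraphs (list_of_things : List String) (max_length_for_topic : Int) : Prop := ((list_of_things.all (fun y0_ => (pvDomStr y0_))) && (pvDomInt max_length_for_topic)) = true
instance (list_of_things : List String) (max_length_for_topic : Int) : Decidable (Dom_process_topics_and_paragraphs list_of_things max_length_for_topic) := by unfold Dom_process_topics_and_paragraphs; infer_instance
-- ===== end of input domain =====

-- B replaces A's single accumulator-string pass by a run-scanning decomposition (scan each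
-- maximal run of long items and join it at once); objective: alternative structure, same cost.

-- ===== PORT A =====
-- one loop step of A: state = (new_final_script, current_paragraph); the enumerate index is unused
def pvStepA (m : Int) (st : List String × String) (p : Int × String) : List String × String :=
  let item := p.2
  if PySem.Str.len item < m then
    if st.2 ≠ "" then (st.1 ++ [st.2] ++ [item], "")
    else (st.1 ++ [item], st.2)
  else
    if st.2 ≠ "" then (st.1, st.2 ++ " " ++ item)
    else (st.1, item)

def process_topics_and_paragraphs (list_of_things : List String) (max_length_for_topic : Int) : List String :=
  let st := (PySem.List.enumerate list_of_things).foldl (pvStepA max_length_for_topic) ([], "")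
  if st.2 ≠ "" then st.1 ++ [st.2] else st.1

-- ===== PORT B =====
-- B's inner while loop: split off the maximal leading run of long items (len ≥ m)
def pvSpanLong (m : Int) : List String → List String × List String
  | [] => ([], [])
  | x :: xs =>
    if PySem.Str.len x ≥ m then
      let p := pvSpanLong m xs
      (x :: p.1, p.2)
    else ([], x :: xs)

theorem pvSpanLong_snd_le (m : Int) (l : List String) : (pvSpanLong m l).2.length ≤ l.length := by
  induction l with
  | nil => simp [pvSpanLong]
  | cons x xs ih =>
    simp only [pvSpanLong]
    split
    · exact Nat.le_succ_of_le ih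
    · simp

def process_topics_and_paragraphs_alt (list_of_things : List String) (max_length_for_topic : Int) : List String :=
  match list_of_things with
  | [] => []
  | x :: xs =>
    if PySem.Str.len x ≥ max_length_for_topic then
      let p := pvSpanLong max_length_for_topic xs
      PySem.Str.join " " (x :: p.1) :: process_topics_and_paragraphs_alt p.2 max_length_for_topic
    else
      x :: process_topics_and_paragraphs_alt xs max_length_for_topic
termination_by list_of_things.length
decreasing_by
  · have := pvSpanLong_snd_le max_length_for_topic xs; simp; omega
  · simp

-- ===== PRECONDITION & SPEC =====
-- Pre_ excludes only the degenerate corner of a NONPOSITIVE length threshold with an EMPTY first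
-- string: there the empty string counts as a 'long' item, A's truthiness test silently drops it
-- while B's join keeps its separator — an unspecified corner where neither value is the intended one.
def Pre_process_topics_and_paragraphs (list_of_things : List String) (max_length_for_topic : Int) : Prop :=
  ¬ (max_length_for_topic ≤ 0 ∧ list_of_things.head? = some "")
instance (list_of_things : List String) (max_length_for_topic : Int) : Decidable (Pre_process_topics_and_paragraphs list_of_things max_length_for_topic) := by unfold Pre_process_topics_and_paragraphs; infer_instance

def pvWitness_process_topics_and_paragraphs : List String × Int := (["hi", "a reasonably long paragraph", "and another long one"], 8)

def Spec_process_topics_and_paragraphs (list_of_things : List String) (max_length_for_topic : Int) (out : List String) : Prop := out = process_topics_and_paragraphs_alt list_of_things max_length_for_topic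
instance (list_of_things : List String) (max_length_for_topic : Int) (out : List String) : Decidable (Spec_process_topics_and_paragraphs list_of_things max_length_for_topic out) := by unfold Spec_process_topics_and_paragraphs; infer_instance

-- ===== CLAIM (what is proved, stated in full; the proofs are below) =====
def Claim_equal_process_topics_and_paragraphs : Prop := ∀ (list_of_things : List String) (max_length_for_topic : Int), Dom_process_topics_and_paragraphs list_of_things max_length_for_topic → Pre_process_topics_and_paragraphs list_of_things max_length_for_topic → Spec_process_topics_and_paragraphs list_of_things max_length_for_topic (process_topics_and_paragraphs list_of_things max_length_for_topic)

-- ===== LEMMAS AND PROOFS =====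

-- A's finishing step
def pvFinA (st : List String × String) : List String :=
  if st.2 ≠ "" then st.1 ++ [st.2] else st.1

-- the enumerate index is never read by pvStepA
theorem pvFoldA_enum (m : Int) (l : List String) (st : List String × String) (n : Int) :
    (PySem.List.enumerate l n).foldl (pvStepA m) st =
      l.foldl (fun st item => pvStepA m st (0, item)) st := by
  induction l generalizing st n with
  | nil => simp [PySem.List.enumerate_nil]
  | cons x xs ih => simp [PySem.List.enumerate_cons, List.foldl_cons, pvStepA, ih]

theorem pv_ne_empty_iff (s : String) : s ≠ "" ↔ s.toList ≠ [] := by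
  rw [not_iff_not, String.ext_iff]; simp

theorem pv_append_ne_empty (c x : String) : c ++ " " ++ x ≠ "" := by
  rw [pv_ne_empty_iff]; simp

theorem pv_long_ne_empty {x : String} {m : Int} (h1 : PySem.Str.len x ≥ m)
    (h2 : m ≤ 0 → x ≠ "") : x ≠ "" := by
  by_cases hm : m ≤ 0
  · exact h2 hm
  · rw [pv_ne_empty_iff]
    intro hx
    have : PySem.Str.len x = 0 := by
      simp [PySem.Str.len_eq, hx]
    omega

-- joining with ' ' absorbs the already-accumulated 'c ++ " " ++ x'
theorem pv_join_shift (c x : String) (r : List String) :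
    PySem.Str.join " " (c :: x :: r) = PySem.Str.join " " ((c ++ " " ++ x) :: r) := by
  rw [String.ext_iff]
  cases r <;>
    simp [PySem.Str.toList_join, PySem.Chars.join, List.intercalate, List.intersperse]

theorem pv_join_singleton (c : String) : PySem.Str.join " " [c] = c := by
  rw [String.ext_iff]
  simp [PySem.Str.toList_join, PySem.Chars.join, List.intercalate]

-- main invariant: from state (acc, c) A's remaining loop produces acc ++ (B's answer,
-- with a pending paragraph c absorbed into the leading run of long items)
theorem pv_main (m : Int) (l : List String) (acc : List String) (c : String)
    (hc : c = "" → (m ≤ 0 → l.head? ≠ some "")) :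
    pvFinA (l.foldl (fun st item => pvStepA m st (0, item)) (acc, c)) =
      acc ++ (if c = "" then process_topics_and_paragraphs_alt l m
              else PySem.Str.join " " (c :: (pvSpanLong m l).1) ::
                   process_topics_and_paragraphs_alt (pvSpanLong m l).2 m) := by
  induction l generalizing acc c with
  | nil =>
    by_cases h : c = "" <;>
      simp [pvFinA, pvSpanLong, process_topics_and_paragraphs_alt, h, pv_join_singleton]
  | cons x xs ih =>
    by_cases hshort : PySem.Str.len x < m
    · -- x is a short item
      have hS : (x.length : Int) < m := by simpa [PySem.Str.len_eq] using hshort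
      have hm1 : ¬ m ≤ 0 := by omega
      by_cases h : c = ""
      · rw [List.foldl_cons]
        have hstep : pvStepA m (acc, c) (0, x) = (acc ++ [x], "") := by
          simp [pvStepA, hshort, hS, h]
        rw [hstep, ih (acc ++ [x]) "" (fun _ hm => absurd hm hm1)]
        simp [process_topics_and_paragraphs_alt, h, not_le.mpr hS]
      · rw [List.foldl_cons]
        have hstep : pvStepA m (acc, c) (0, x) = (acc ++ [c] ++ [x], "") := by
          simp [pvStepA, hshort, hS, h]
        rw [hstep, ih (acc ++ [c] ++ [x]) "" (fun _ hm => absurd hm hm1)]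
        simp [process_topics_and_paragraphs_alt, h, not_le.mpr hS, pvSpanLong,
          pv_join_singleton]
    · -- x is a long item
      have hlong : PySem.Str.len x ≥ m := by omega
      have hL : m ≤ (x.length : Int) := by simpa [PySem.Str.len_eq] using hlong
      by_cases h : c = ""
      · have hx : x ≠ "" := pv_long_ne_empty hlong (by
          intro hm; have := hc h hm; simp at this; exact this)
        rw [List.foldl_cons]
        have hstep : pvStepA m (acc, c) (0, x) = (acc, x) := by
          simp [pvStepA, not_lt.mpr hlong, hL, h]
        rw [hstep, ih acc x (fun hx' => absurd hx' hx)]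
        simp [process_topics_and_paragraphs_alt, h, hL, hx]
      · rw [List.foldl_cons]
        have hstep : pvStepA m (acc, c) (0, x) = (acc, c ++ " " ++ x) := by
          simp [pvStepA, not_lt.mpr hlong, hL, h]
        rw [hstep, ih acc (c ++ " " ++ x) (fun hx' => absurd hx' (pv_append_ne_empty c x))]
        simp only [pv_append_ne_empty c x, h, ite_false, if_neg]
        rw [← pv_join_shift]
        simp [pvSpanLong, hL]

-- ===== VERDICT (by name: the statement is the Claim_ definition above) =====
theorem process_topics_and_paragraphs_spec : Claim_equal_process_topics_and_paragraphs := by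
  intro l m _hdom hpre
  unfold Spec_process_topics_and_paragraphs process_topics_and_paragraphs
  rw [show ((PySem.List.enumerate l).foldl (pvStepA m) ([], "")) =
      (l.foldl (fun st item => pvStepA m st (0, item)) ([], "")) from pvFoldA_enum m l _ 0]
  have h := pv_main m l [] "" (by
    intro _ hm
    unfold Pre_process_topics_and_paragraphs at hpre
    push_neg at hpre
    exact hpre hm)
  simp only [List.nil_append] at h
  simpa [pvFinA] using h
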